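-- pv_equiv track=rewrite | github.com/denis-svg/Laborator | md1/3.py | last_char_index
-- ===== SOURCE A (Python) =====
-- def last_char_index(char, string, number):
--     if char == "":
--         return len(string)
--     i = len(string) - 1
--     count = 0
--     while i > -1:
--         if string[i] == char:
--             count += 1
--             if count == number:
--                 return i
--         i -= 1
--     return -1
-- ===== SOURCE B (Python) =====
-- def last_char_index(char, string, number):
--     if char == "":
--         return len(string)
--     positions = [i for i, c in enumerate(string) if c == char]
--     if 1 <= number <= len(positions):
--         return positions[len(positions) - number]
--     return -1
-- ===== Notes on version B (the rewrite author's own statement) =====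
-- stated objective: alternative
-- what changed: Replaces the backward index-decrementing while loop with a counter by a single forward pass that builds the table of all match positions and then indexes it (len(positions)-number) with an explicit 1<=number<=len(positions) guard.
import Mathlib
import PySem

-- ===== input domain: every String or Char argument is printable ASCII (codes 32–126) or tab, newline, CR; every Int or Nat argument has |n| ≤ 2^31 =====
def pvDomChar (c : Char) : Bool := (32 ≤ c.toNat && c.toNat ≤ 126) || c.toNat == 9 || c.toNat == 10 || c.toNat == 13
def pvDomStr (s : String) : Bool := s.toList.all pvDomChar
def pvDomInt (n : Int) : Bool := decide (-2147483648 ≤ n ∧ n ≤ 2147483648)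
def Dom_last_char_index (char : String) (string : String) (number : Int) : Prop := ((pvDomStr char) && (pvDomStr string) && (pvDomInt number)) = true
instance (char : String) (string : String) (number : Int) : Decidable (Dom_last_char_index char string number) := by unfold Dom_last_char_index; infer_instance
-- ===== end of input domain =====

-- B replaces A's backward while-loop with a counter by one forward pass building the
-- table of match positions and a single index into it (objective: alternative).

-- ===== PORT A =====
-- the while loop: i runs len-1 .. 0; scanning the reversed list carries the same
-- index i and counter; string[i] is the head of the remaining reversed suffix.
def lciLoop (char : String) (number : Int) : List Char → Int → Int → Int
  | [], _, _ => -1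
  | c :: rest, i, count =>
      if [c] = char.toList then
        if count + 1 = number then i
        else lciLoop char number rest (i - 1) (count + 1)
      else lciLoop char number rest (i - 1) count

def last_char_index (char : String) (string : String) (number : Int) : Int :=
  if char = "" then PySem.Str.len string
  else lciLoop char number string.toList.reverse (PySem.Str.len string - 1) 0

-- ===== PORT B =====
def last_char_index_alt (char : String) (string : String) (number : Int) : Int :=
  if char = "" then PySem.Str.len string
  else
    let positions : List Int :=
      (PySem.List.enumerate string.toList 0).filterMap
        (fun p => if [p.2] = char.toList then some p.1 else none)
    if 1 ≤ number ∧ number ≤ (positions.length : Int) then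
      positions.getD (positions.length - number.toNat) 0
    else -1

-- ===== PRECONDITION & SPEC =====
def Spec_last_char_index (char : String) (string : String) (number : Int) (out : Int) : Prop := out = last_char_index_alt char string number
instance (char : String) (string : String) (number : Int) (out : Int) : Decidable (Spec_last_char_index char string number out) := by unfold Spec_last_char_index; infer_instance

-- ===== CLAIM (what is proved, stated in full; the proofs are below) =====
def Claim_equal_last_char_index : Prop := ∀ (char : String) (string : String) (number : Int), Dom_last_char_index char string number → Spec_last_char_index char string number (last_char_index char string number)

-- ===== LEMMAS AND PROOFS =====

-- positions of matches, with starting offset s (proof-side characterisation)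
def posL (char : String) (s : Int) : List Char → List Int
  | [] => []
  | c :: cs => if [c] = char.toList then s :: posL char (s + 1) cs else posL char (s + 1) cs

-- the common value both ports compute from the position table P and the request k
def lciSpec (P : List Int) (k : Int) : Int :=
  if 1 ≤ k ∧ k ≤ (P.length : Int) then P.getD (P.length - k.toNat) 0 else -1

theorem posL_append (char : String) (xs ys : List Char) (s : Int) :
    posL char s (xs ++ ys) = posL char s xs ++ posL char (s + xs.length) ys := by
  induction xs generalizing s with
  | nil => simp [posL]
  | cons c cs ih =>
      simp only [List.cons_append, posL, ih]
      split_ifs <;> simp <;> ring_nf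

theorem filterMap_enumerate_eq_posL (char : String) (cs : List Char) (s : Int) :
    (PySem.List.enumerate cs s).filterMap
        (fun p => if [p.2] = char.toList then some p.1 else none) = posL char s cs := by
  induction cs generalizing s with
  | nil => simp [PySem.List.enumerate_nil, posL]
  | cons c rest ih =>
      simp only [PySem.List.enumerate_cons, List.filterMap_cons, posL]
      split_ifs <;> simp [ih]

theorem lciSpec_concat (P : List Int) (x k : Int) (hk : k ≠ 1) :
    lciSpec (P ++ [x]) k = lciSpec P (k - 1) := by
  unfold lciSpec
  by_cases h : 1 ≤ k - 1 ∧ k - 1 ≤ (P.length : Int)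
  · have hc : 1 ≤ k ∧ k ≤ ((P ++ [x]).length : Int) := by simp; omega
    rw [if_pos hc, if_pos h]
    have hidx : (P ++ [x]).length - k.toNat = P.length - (k - 1).toNat := by
      simp; omega
    rw [hidx]
    have hlt : P.length - (k - 1).toNat < P.length := by omega
    rw [List.getD_eq_getElem?_getD, List.getD_eq_getElem?_getD, List.getElem?_append_left hlt]
  · have hc : ¬ (1 ≤ k ∧ k ≤ ((P ++ [x]).length : Int)) := by simp; omega
    rw [if_neg hc, if_neg h]

theorem lciLoop_eq_spec (char : String) (number : Int) (r : List Char) (s count : Int) :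
    lciLoop char number r (s + r.length - 1) count
      = lciSpec (posL char s r.reverse) (number - count) := by
  induction r generalizing s count with
  | nil =>
      simp only [lciLoop, posL, List.reverse_nil, lciSpec, List.length_nil]
      rw [if_neg (by omega)]
  | cons c rest ih =>
      simp only [lciLoop, List.reverse_cons, List.length_cons]
      rw [posL_append]
      have hlen : (rest.reverse.length : Int) = (rest.length : Int) := by simp
      by_cases hm : [c] = char.toList
      · rw [if_pos hm]
        simp only [posL, if_pos hm]
        by_cases hn : count + 1 = number
        · rw [if_pos hn]
          have hk : number - count = 1 := by omega
          unfold lciSpec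
          rw [hk]
          set P := posL char s rest.reverse with hP
          have hc : 1 ≤ (1:Int) ∧ (1:Int) ≤ ((P ++ [s + ↑rest.reverse.length]).length : Int) := by
            simp
          rw [if_pos hc]
          have : (P ++ [s + ↑rest.reverse.length]).length - (1:Int).toNat = P.length := by
            simp
          rw [this]
          simp only [List.getD, List.getElem?_concat_length, Option.getD_some]
          push_cast
          omega
        · rw [if_neg hn]
          have h1 : s + (↑rest.length + 1) - 1 - 1 = s + ↑rest.length - 1 := by ring
          push_cast
          rw [h1, ih s (count + 1)]
          have h2 : number - count ≠ 1 := by omega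
          rw [lciSpec_concat _ _ _ h2]
          congr 1
          omega
      · rw [if_neg hm]
        simp only [posL, if_neg hm, List.append_nil]
        have h1 : s + (↑rest.length + 1) - 1 - 1 = s + ↑rest.length - 1 := by ring
        push_cast
        rw [h1, ih s count]

-- ===== VERDICT (by name: the statement is the Claim_ definition above) =====
theorem last_char_index_spec : Claim_equal_last_char_index := by
  intro char string number _
  unfold Spec_last_char_index last_char_index last_char_index_alt
  by_cases h : char = ""
  · simp [h]
  · rw [if_neg h, if_neg h]
    have hlen : PySem.Str.len string = (string.toList.length : Int) := by
      simp [PySem.Str.len_eq]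
    rw [hlen]
    have := lciLoop_eq_spec char number string.toList.reverse 0 0
    simp only [List.length_reverse, List.reverse_reverse, zero_add, Int.sub_zero] at this
    rw [this]
    rw [filterMap_enumerate_eq_posL]
    unfold lciSpec
    rfl
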